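-- pv_equiv track=rewrite | github.com/kkeolmusae/algorithm | 이코테/유형별 기출문제/Greedy/A06.practice.py | solution
-- ===== SOURCE A (Python) =====
-- import heapq
--
-- def solution(food_times, k):
--
--     # 시간안에 음식 다 먹을 수 있으면 남는음식 없음
--     if sum(food_times) <= k:
--         return -1
--
--     q = []
--
--     # (음식 먹는데 걸린 시간, 음식 순서)로 heapq에 넣음 -> 음식 먹는데 걸리는 시간 작은거 부터 처리 예정
--     for idx in range(len(food_times)):
--         heapq.heappush(q, (food_times[idx], idx + 1))
--
--     prev_food_time = 0
--     food_count = len(food_times)  # 총 음식의 개수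
--     while q:
--         current_time, current_order = q[0]
--
--         bulk_size = (current_time - prev_food_time) * food_count
--
--         if bulk_size > k:
--             break
--
--         heapq.heappop(q)
--         food_count -= 1
--         prev_food_time = current_time
--         k -= bulk_size
--
--     q.sort(key=lambda x: x[1])  # order 순 정렬
--     return q[k % len(q)][1]
-- ===== SOURCE B (Python) =====
-- def solution(food_times, k):
--     # Not enough food to outlast k seconds -> nothing left
--     if sum(food_times) <= k:
--         return -1
--     n = len(food_times)
--     pairs = sorted(((t, i) for i, t in enumerate(food_times, 1)), key=lambda x: x[0])
--
--     # prefix sums of eating times in sorted order: pre[m] = sum of first m times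
--     s = 0
--     pre = [0]
--     for t, _ in pairs:
--         s += t
--         pre.append(s)
--
--     # closed-form cost of fully eating the first m foods in sorted order
--     def cost(m):
--         if m == 0:
--             return 0
--         return pre[m - 1] + pairs[m - 1][0] * (n - m + 1)
--
--     # binary search for the number of fully eaten foods:
--     # least m with cost(m+1) > k (cost is monotone there), or n
--     lo, hi = 0, n
--     while lo < hi:
--         mid = (lo + hi) // 2
--         if cost(mid + 1) > k:
--             hi = mid
--         else:
--             lo = mid + 1
--
--     remaining = sorted(i for _, i in pairs[lo:])
--     return remaining[(k - cost(lo)) % len(remaining)]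
-- ===== Notes on version B (the rewrite author's own statement) =====
-- stated objective: alternative
-- what changed: Instead of simulating the eating loop (heap build, then one peek/pop and bulk subtraction per eaten food), B derives a closed-form cost(m) for fully eating the first m foods of the time-sorted order from a prefix-sum array and binary-searches for the break point, then indexes the sorted remaining slice directly.
import Mathlib
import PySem

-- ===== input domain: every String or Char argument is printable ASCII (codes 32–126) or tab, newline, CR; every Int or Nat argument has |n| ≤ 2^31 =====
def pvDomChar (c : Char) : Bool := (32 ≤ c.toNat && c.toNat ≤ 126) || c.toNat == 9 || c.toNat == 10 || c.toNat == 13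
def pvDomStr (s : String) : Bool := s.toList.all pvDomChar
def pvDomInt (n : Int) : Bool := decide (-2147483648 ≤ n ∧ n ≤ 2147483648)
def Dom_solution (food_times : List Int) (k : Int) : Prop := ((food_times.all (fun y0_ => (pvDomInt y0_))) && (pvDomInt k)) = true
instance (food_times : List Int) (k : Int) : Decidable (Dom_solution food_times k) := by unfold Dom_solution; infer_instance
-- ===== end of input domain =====

-- B replaces A's heap simulation (one bulk subtraction per popped food) by a closed-form
-- cost over prefix sums of the time-sorted foods plus a binary search for the break point
-- (alternative algorithm, same O(n log n)); A mutates no argument observably.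

-- ===== PORT A =====
-- A uses heapq; the heapq primitives (CPython's pure-Python heappush/heappop with
-- _siftdown/_siftup) are ported by hand below, step for step, on the array (List) itself;
-- exact for Int×Int items, where Python's tuple '<' is the lexicographic pvLt.
def pvLt (a b : Int × Int) : Bool := a.1 < b.1 || (a.1 == b.1 && a.2 < b.2)

theorem pvSiftdown_dec (start pos : Nat) (h : start < pos) : (pos - 1) / 2 < pos := by omega

-- CPython _siftdown(heap, startpos, pos) after 'newitem = heap[pos]' has been read
def pvSiftdownLoop (h : List (Int × Int)) (start pos : Nat) (newitem : Int × Int) :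
    List (Int × Int) :=
  if _hp : start < pos then
    let parentpos := (pos - 1) / 2
    let parent := h.getD parentpos (0, 0)
    if pvLt newitem parent then pvSiftdownLoop (h.set pos parent) start parentpos newitem
    else h.set pos newitem
  else h.set pos newitem
termination_by pos
decreasing_by exact pvSiftdown_dec start pos _hp

-- heapq._siftdown
def pvSiftdown (h : List (Int × Int)) (start pos : Nat) : List (Int × Int) :=
  pvSiftdownLoop h start pos (h.getD pos (0, 0))

theorem pvIte_le (c : Prop) [inst : Decidable c] (x : Nat) : x ≤ if c then x + 1 else x := by
  split <;> omega

theorem pvSiftup_dec (n pos cp : Nat) (hc : 2 * pos + 1 < n) (hcp : 2 * pos + 1 ≤ cp) :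
    n - cp < n - pos := by omega

-- the while-loop of heapq._siftup (after 'newitem = heap[pos]'), then the trailing _siftdown
def pvSiftupLoop (h : List (Int × Int)) (start pos : Nat) (newitem : Int × Int) :
    List (Int × Int) :=
  if _hc : 2 * pos + 1 < h.length then
    let c := 2 * pos + 1
    let childpos :=
      if c + 1 < h.length && !(pvLt (h.getD c (0, 0)) (h.getD (c + 1) (0, 0))) then c + 1 else c
    pvSiftupLoop (h.set pos (h.getD childpos (0, 0))) start childpos newitem
  else pvSiftdownLoop (h.set pos newitem) start pos newitem
termination_by h.length - pos
decreasing_by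
  simp only [List.length_set]
  exact pvSiftup_dec h.length pos _ _hc (pvIte_le _ _)

-- heapq._siftup
def pvSiftup (h : List (Int × Int)) (pos : Nat) : List (Int × Int) :=
  pvSiftupLoop h pos pos (h.getD pos (0, 0))

-- heapq.heappush
def pvHeappush (h : List (Int × Int)) (item : Int × Int) : List (Int × Int) :=
  pvSiftdown (h ++ [item]) 0 ((h ++ [item]).length - 1)

-- heapq.heappop: returns (popped item, heap afterwards); Python raises IndexError on [],
-- which A's 'while q' guard never reaches (junk value there).
def pvHeappop (h : List (Int × Int)) : (Int × Int) × List (Int × Int) :=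
  let lastelt := h.getLastD (0, 0)
  let rest := h.dropLast
  if rest.isEmpty then (lastelt, [])
  else (rest.getD 0 (0, 0), pvSiftup (rest.set 0 lastelt) 0)

-- A's while-loop: peek q[0], break or heappop; fuel (the initial heap size at the call
-- site) is only a totality guard: each iteration pops one element, so it never runs out
def pvLoopA (fuel : Nat) (q : List (Int × Int)) (prev cnt k : Int) :
    List (Int × Int) × Int :=
  match fuel with
  | 0 => (q, k)
  | fuel + 1 =>
    if q = [] then (q, k)
    else
      let ct := (q.getD 0 (0, 0)).1
      let bulk := (ct - prev) * cnt
      if bulk > k then (q, k)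
      else pvLoopA fuel (pvHeappop q).2 ct (cnt - 1) (k - bulk)

def solution (food_times : List Int) (k : Int) : Int :=
  if food_times.sum ≤ k then -1
  else
    let q := (PySem.List.pyRange 0 (food_times.length : Int)).foldl
      (fun q idx => pvHeappush q (PySem.List.pyGetD food_times idx 0, idx + 1)) []
    let r := pvLoopA q.length q 0 (food_times.length : Int) k
    let s := PySem.List.sorted r.1 (fun x => x.2)
    (PySem.List.pyGetD s (PySem.Int.mod r.2 (s.length : Int)) (0, 0)).2

-- ===== PORT B =====
-- Source B's closure cost(m) over pre, pairs, n, ported with them as explicit parameters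
def pvCostB (pre : List Int) (pairs : List (Int × Int)) (n m : Int) : Int :=
  if m = 0 then 0
  else PySem.List.pyGetD pre (m - 1) 0 + (PySem.List.pyGetD pairs (m - 1) (0, 0)).1 * (n - m + 1)

theorem pvBsearch_dec_left (lo hi : Int) (h : lo < hi) :
    (PySem.Int.floordiv (lo + hi) 2 - lo).toNat < (hi - lo).toNat := by
  have h1 := (PySem.Int.floordiv_lt_iff_lt_mul (a := lo + hi) (q := hi)
    (by omega : (0:Int) < 2)).mpr (by omega)
  have h2 := (PySem.Int.le_floordiv_iff_mul_le (a := lo + hi) (q := lo)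
    (by omega : (0:Int) < 2)).mpr (by omega)
  omega

theorem pvBsearch_dec_right (lo hi : Int) (h : lo < hi) :
    (hi - (PySem.Int.floordiv (lo + hi) 2 + 1)).toNat < (hi - lo).toNat := by
  have h2 := (PySem.Int.le_floordiv_iff_mul_le (a := lo + hi) (q := lo)
    (by omega : (0:Int) < 2)).mpr (by omega)
  omega

-- Source B's while-loop binary search for the least m with cost(m+1) > k
def pvBsearch (cost : Int → Int) (k lo hi : Int) : Int :=
  if _h : lo < hi then
    let mid := PySem.Int.floordiv (lo + hi) 2
    if cost (mid + 1) > k then pvBsearch cost k lo mid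
    else pvBsearch cost k (mid + 1) hi
  else lo
termination_by (hi - lo).toNat
decreasing_by
  · exact pvBsearch_dec_left lo hi _h
  · exact pvBsearch_dec_right lo hi _h

def solution_alt (food_times : List Int) (k : Int) : Int :=
  if food_times.sum ≤ k then -1
  else
    let n : Int := (food_times.length : Int)
    let pairs := PySem.List.sorted
      ((PySem.List.enumerate food_times 1).map (fun p => (p.2, p.1))) (fun x => x.1)
    let pre := (pairs.foldl (fun sp p => (sp.1 + p.1, sp.2 ++ [sp.1 + p.1]))
      ((0 : Int), ([0] : List Int))).2
    let lo := pvBsearch (pvCostB pre pairs n) k 0 n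
    let remaining := PySem.List.sorted
      ((PySem.List.slice pairs (some lo) none).map (fun p => p.2)) (fun x => x)
    PySem.List.pyGetD remaining
      (PySem.Int.mod (k - pvCostB pre pairs n lo) (remaining.length : Int)) 0

-- ===== PRECONDITION & SPEC =====
-- Pre_ excludes only food_times = [] with k < 0, where A (and B) raise ZeroDivisionError
-- in 'k % len(q)' on the empty leftover list.
def Pre_solution (food_times : List Int) (k : Int) : Prop := food_times = [] → 0 ≤ k
instance (food_times : List Int) (k : Int) : Decidable (Pre_solution food_times k) := by
  unfold Pre_solution; infer_instance

def pvWitness_solution : List Int × Int := ([3, 1, 2], 5)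

def Spec_solution (food_times : List Int) (k : Int) (out : Int) : Prop :=
  out = solution_alt food_times k
instance (food_times : List Int) (k : Int) (out : Int) : Decidable (Spec_solution food_times k out) := by
  unfold Spec_solution; infer_instance

-- ===== CLAIM (what is proved, stated in full; the proofs are below) =====
def Claim_equal_solution : Prop := ∀ (food_times : List Int) (k : Int),
  Dom_solution food_times k → Pre_solution food_times k →
  Spec_solution food_times k (solution food_times k)

-- ===== LEMMAS AND PROOFS =====

-- order facts about the lexicographic comparison
theorem pvLt_irrefl (a : Int × Int) : pvLt a a = false := by simp [pvLt]

theorem pvLt_asymm {a b : Int × Int} : pvLt a b = true → pvLt b a = false := by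
  rcases a with ⟨a1, a2⟩; rcases b with ⟨b1, b2⟩
  simp [pvLt]; omega

theorem pvLe_trans {a b c : Int × Int} :
    pvLt b a = false → pvLt c b = false → pvLt c a = false := by
  rcases a with ⟨a1, a2⟩; rcases b with ⟨b1, b2⟩; rcases c with ⟨c1, c2⟩
  simp [pvLt]; omega

-- heap shape
def pvChildOf (c i : Nat) : Prop := c = 2 * i + 1 ∨ c = 2 * i + 2

def pvIsHeap (h : List (Int × Int)) : Prop :=
  ∀ i c, pvChildOf c i → c < h.length →
    pvLt (h.getD c (0, 0)) (h.getD i (0, 0)) = false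

theorem pvGetD_set_self {α : Type} {l : List α} {i : Nat} {v d : α} (hi : i < l.length) :
    (l.set i v).getD i d = v := by
  simp [List.getD_eq_getElem?_getD, List.getElem?_set_self hi]

theorem pvGetD_set_ne {α : Type} {l : List α} {i j : Nat} {v d : α} (hij : i ≠ j) :
    (l.set i v).getD j d = l.getD j d := by
  simp [List.getD_eq_getElem?_getD, List.getElem?_set_ne hij]

theorem pvSet_perm_cons_eraseIdx {α : Type} {l : List α} {i : Nat} (v : α) (hi : i < l.length) :
    (l.set i v).Perm (v :: l.eraseIdx i) := by
  rw [List.set_eq_take_append_cons_drop, if_pos hi, List.eraseIdx_eq_take_drop_succ]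
  exact List.perm_middle

theorem pvPerm_cons_eraseIdx {α : Type} {l : List α} {i : Nat} (d : α) (hi : i < l.length) :
    l.Perm (l.getD i d :: l.eraseIdx i) := by
  rw [List.getD_eq_getElem l d hi]
  have h1 := pvSet_perm_cons_eraseIdx (l := l) (i := i) (l[i]) hi
  rwa [List.set_getElem_self] at h1

theorem pvSet_set_perm {α : Type} (d : α) :
    ∀ (l : List α) (i j : Nat) (b : α), i < l.length → j < l.length → i ≠ j →
    ((l.set i (l.getD j d)).set j b).Perm (l.set i b) := by
  intro l
  induction l with
  | nil => intro i j b hi; simp at hi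
  | cons x t ih =>
    intro i j b hi hj hij
    match i, j with
    | 0, 0 => exact absurd rfl hij
    | 0, j + 1 =>
      have hjt : j < t.length := by simpa using hj
      simp only [List.getD_cons_succ, List.set_cons_zero, List.set_cons_succ]
      have e1 : (t.set j b).Perm (b :: t.eraseIdx j) := pvSet_perm_cons_eraseIdx b hjt
      have e2 : t.Perm (t.getD j d :: t.eraseIdx j) := pvPerm_cons_eraseIdx d hjt
      exact ((e1.cons _).trans (List.Perm.swap _ _ _)).trans ((e2.cons b).symm)
    | i + 1, 0 =>
      have hit : i < t.length := by simpa using hi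
      simp only [List.getD_cons_zero, List.set_cons_succ, List.set_cons_zero]
      have e1 : (t.set i x).Perm (x :: t.eraseIdx i) := pvSet_perm_cons_eraseIdx x hit
      have e2 : (t.set i b).Perm (b :: t.eraseIdx i) := pvSet_perm_cons_eraseIdx b hit
      exact ((e1.cons _).trans (List.Perm.swap _ _ _)).trans ((e2.cons x).symm)
    | i + 1, j + 1 =>
      have hit : i < t.length := by simpa using hi
      have hjt : j < t.length := by simpa using hj
      simp only [List.getD_cons_succ, List.set_cons_succ]
      exact (ih i j b hit hjt (by omega)).cons x

theorem pvHeap_root (h : List (Int × Int)) (hh : pvIsHeap h) :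
    ∀ i, i < h.length → pvLt (h.getD i (0, 0)) (h.getD 0 (0, 0)) = false := by
  intro i
  induction i using Nat.strong_induction_on with
  | _ i ih =>
    intro hi
    rcases Nat.eq_zero_or_pos i with h0 | hpos
    · subst h0; exact pvLt_irrefl _
    · have hchild : pvChildOf i ((i - 1) / 2) := by unfold pvChildOf; omega
      have h1 : pvLt (h.getD i (0, 0)) (h.getD ((i - 1) / 2) (0, 0)) = false :=
        hh _ _ hchild hi
      have h2 : pvLt (h.getD ((i - 1) / 2) (0, 0)) (h.getD 0 (0, 0)) = false :=
        ih ((i - 1) / 2) (by omega) (by omega)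
      exact pvLe_trans h2 h1

theorem pvSiftdownLoop_perm (h : List (Int × Int)) (pos : Nat) (newitem : Int × Int)
    (hp : pos < h.length) :
    (pvSiftdownLoop h 0 pos newitem).Perm (h.set pos newitem) := by
  fun_induction pvSiftdownLoop h 0 pos newitem with
  | case1 a b c d e f ih =>
    have hpp : d < a.length := by simp only [d]; omega
    have := ih (by simpa using hpp)
    refine this.trans ?_
    exact pvSet_set_perm (0, 0) a b d newitem hp (by simpa using hpp) (by simp only [d]; omega)
  | case2 => exact List.Perm.refl _
  | case3 => exact List.Perm.refl _

theorem pvSiftdownLoop_heap (h : List (Int × Int)) (pos : Nat) (newitem : Int × Int)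
    (hp : pos < h.length)
    (K1 : ∀ i c, pvChildOf c i → c < h.length → i ≠ pos → c ≠ pos →
      pvLt (h.getD c (0, 0)) (h.getD i (0, 0)) = false)
    (K2 : ∀ c, pvChildOf c pos → c < h.length → pvLt (h.getD c (0, 0)) newitem = false)
    (K3 : ∀ c, pvChildOf c pos → c < h.length → 0 < pos →
      pvLt (h.getD c (0, 0)) (h.getD ((pos - 1) / 2) (0, 0)) = false) :
    pvIsHeap (pvSiftdownLoop h 0 pos newitem) := by
  fun_induction pvSiftdownLoop h 0 pos newitem with
  | case1 a b hb d e f ih =>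
    have hd2 : d = (b - 1) / 2 := rfl
    have he : e = a.getD d (0, 0) := rfl
    have hdb : d < b := by omega
    have hlen : (a.set b e).length = a.length := by simp
    apply ih
    · simpa [hlen] using (by omega : d < a.length)
    · -- K1'
      intro i c hc hcl hid hcd
      rw [hlen] at hcl
      have hic : i < c := by unfold pvChildOf at hc; omega
      by_cases hcb : c = b
      · exfalso; apply hid; unfold pvChildOf at hc; omega
      · rw [pvGetD_set_ne (by omega : b ≠ c)]
        by_cases hib : i = b
        · subst hib
          rw [pvGetD_set_self hp]
          exact K3 c (by unfold pvChildOf at hc ⊢; omega) hcl hb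
        · rw [pvGetD_set_ne (by omega : b ≠ i)]
          exact K1 i c hc hcl hib hcb
    · -- K2'
      intro c hc hcl
      rw [hlen] at hcl
      by_cases hcb : c = b
      · rw [hcb, pvGetD_set_self hp]
        exact pvLt_asymm f
      · rw [pvGetD_set_ne (by omega : b ≠ c)]
        have h2 : pvLt (a.getD c (0, 0)) e = false := by
          rw [he]
          exact K1 d c (by unfold pvChildOf at hc ⊢; omega) hcl (by omega) hcb
        exact pvLe_trans (pvLt_asymm f) h2
    · -- K3'
      intro c hc hcl hd0
      rw [hlen] at hcl
      have hgd : (d - 1) / 2 < d := by omega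
      rw [pvGetD_set_ne (by omega : b ≠ (d - 1) / 2)]
      have hKgd : pvLt (a.getD d (0, 0)) (a.getD ((d - 1) / 2) (0, 0)) = false :=
        K1 ((d - 1) / 2) d (by unfold pvChildOf; omega) (by omega) (by omega) (by omega)
      by_cases hcb : c = b
      · rw [hcb, pvGetD_set_self hp, he]
        exact hKgd
      · rw [pvGetD_set_ne (by omega : b ≠ c)]
        have h2 : pvLt (a.getD c (0, 0)) (a.getD d (0, 0)) = false :=
          K1 d c (by unfold pvChildOf at hc ⊢; omega) hcl (by omega) hcb
        exact pvLe_trans hKgd h2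
  | case2 a b hb d e f =>
    intro i c hc hcl
    have hcl' : c < a.length := by simpa using hcl
    have hd2 : d = (b - 1) / 2 := rfl
    by_cases hcb : c = b
    · have hib : i = d := by unfold pvChildOf at hc; omega
      rw [hcb, hib, pvGetD_set_self hp, pvGetD_set_ne (by omega : b ≠ d)]
      simpa using f
    · rw [pvGetD_set_ne (by omega : b ≠ c)]
      by_cases hib : i = b
      · rw [hib, pvGetD_set_self hp]
        rw [hib] at hc
        exact K2 c hc hcl'
      · rw [pvGetD_set_ne (by omega : b ≠ i)]
        exact K1 i c hc hcl' hib hcb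
  | case3 a b hb =>
    have hb0 : b = 0 := by omega
    subst hb0
    intro i c hc hcl
    have hcl' : c < a.length := by simpa using hcl
    have hc1 : 1 ≤ c := by unfold pvChildOf at hc; omega
    rw [pvGetD_set_ne (by omega : (0 : Nat) ≠ c)]
    by_cases hib : i = 0
    · rw [hib, pvGetD_set_self hp]
      rw [hib] at hc
      exact K2 c hc hcl'
    · rw [pvGetD_set_ne (by omega : (0 : Nat) ≠ i)]
      exact K1 i c hc hcl' hib (by omega)

theorem pvSiftupLoop_perm (h : List (Int × Int)) (pos : Nat) (newitem : Int × Int)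
    (hp : pos < h.length) :
    (pvSiftupLoop h 0 pos newitem).Perm (h.set pos newitem) := by
  fun_induction pvSiftupLoop h 0 pos newitem with
  | case1 a b hc cc cp ih =>
    have hcp_lt : cp < a.length := by
      by_cases hcond : (decide (cc + 1 < a.length) &&
          !pvLt (a.getD cc (0, 0)) (a.getD (cc + 1) (0, 0))) = true
      · have h1 : cc + 1 < a.length := by
          rcases Bool.and_eq_true .. |>.mp hcond with ⟨hb1, _⟩
          simpa using hb1
        simp only [cp, dif_pos hcond]; omega
      · simp only [cp, dif_neg hcond]; exact hc
    have hbcp : b < cp := by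
      by_cases hcond : (decide (cc + 1 < a.length) &&
          !pvLt (a.getD cc (0, 0)) (a.getD (cc + 1) (0, 0))) = true
      · simp only [cp, dif_pos hcond]; omega
      · simp only [cp, dif_neg hcond]; omega
    have h1 := ih (by simpa using hcp_lt)
    refine h1.trans ?_
    exact pvSet_set_perm (0, 0) a b cp newitem hp hcp_lt (by omega)
  | case2 a b hc =>
    have h1 := pvSiftdownLoop_perm (a.set b newitem) b newitem (by simpa using hp)
    rwa [List.set_set] at h1

theorem pvSiftupLoop_heap (h : List (Int × Int)) (pos : Nat) (newitem : Int × Int)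
    (hp : pos < h.length)
    (K1 : ∀ i c, pvChildOf c i → c < h.length → i ≠ pos → c ≠ pos →
      pvLt (h.getD c (0, 0)) (h.getD i (0, 0)) = false)
    (K3 : ∀ c, pvChildOf c pos → c < h.length → 0 < pos →
      pvLt (h.getD c (0, 0)) (h.getD ((pos - 1) / 2) (0, 0)) = false) :
    pvIsHeap (pvSiftupLoop h 0 pos newitem) := by
  fun_induction pvSiftupLoop h 0 pos newitem with
  | case1 a b hc cc cp ih =>
    have hccv : cc = 2 * b + 1 := rfl
    have hcases : (cp = cc + 1 ∧ cc + 1 < a.length ∧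
        pvLt (a.getD cc (0, 0)) (a.getD (cc + 1) (0, 0)) = false) ∨
        (cp = cc ∧ (cc + 1 < a.length →
          pvLt (a.getD cc (0, 0)) (a.getD (cc + 1) (0, 0)) = true)) := by
      by_cases hcond : (decide (cc + 1 < a.length) &&
          !pvLt (a.getD cc (0, 0)) (a.getD (cc + 1) (0, 0))) = true
      · left
        rcases Bool.and_eq_true .. |>.mp hcond with ⟨hb1, hb2⟩
        refine ⟨by simp only [cp, dif_pos hcond], by simpa using hb1, by simpa using hb2⟩
      · right
        refine ⟨by simp only [cp, dif_neg hcond], ?_⟩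
        intro hlen1
        by_contra hfalse
        have hf : pvLt (a.getD cc (0, 0)) (a.getD (cc + 1) (0, 0)) = false :=
          Bool.eq_false_iff.mpr hfalse
        exact hcond (by rw [hf]; simp [hlen1])
    have hcp_lt : cp < a.length := by
      rcases hcases with ⟨he, hl, _⟩ | ⟨he, _⟩
      · omega
      · omega
    have hbcp : b < cp ∧ (cp = 2 * b + 1 ∨ cp = 2 * b + 2) := by
      rcases hcases with ⟨he, _, _⟩ | ⟨he, _⟩ <;> omega
    have hmin : ∀ c, pvChildOf c b → c < a.length →
        pvLt (a.getD c (0, 0)) (a.getD cp (0, 0)) = false := by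
      intro c hcc hclen
      rcases hcases with ⟨he, hl, hplt⟩ | ⟨he, himp⟩
      · rcases hcc with h1 | h1
        · have : c = cc := by omega
          rw [this, he]; exact hplt
        · have : c = cp := by omega
          rw [this]; exact pvLt_irrefl _
      · rcases hcc with h1 | h1
        · have : c = cp := by omega
          rw [this]; exact pvLt_irrefl _
        · have hcc1 : c = cc + 1 := by omega
          have := himp (by omega)
          rw [hcc1, he]
          exact pvLt_asymm this
    have hlen : (a.set b (a.getD cp (0, 0))).length = a.length := by simp
    apply ih
    · simpa using hcp_lt
    · -- K1'
      intro i c hcc hcl hicp hccp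
      rw [hlen] at hcl
      have hic : i < c := by unfold pvChildOf at hcc; omega
      by_cases hcb : c = b
      · have hib : i = (b - 1) / 2 := by unfold pvChildOf at hcc; omega
        have hb0 : 0 < b := by unfold pvChildOf at hcc; omega
        rw [hcb, pvGetD_set_self hp, pvGetD_set_ne (by omega : b ≠ i)]
        have := K3 cp (by unfold pvChildOf; omega) hcp_lt hb0
        rwa [hib]
      · rw [pvGetD_set_ne (by omega : b ≠ c)]
        by_cases hib : i = b
        · rw [hib, pvGetD_set_self hp]
          rw [hib] at hcc
          exact hmin c hcc hcl
        · rw [pvGetD_set_ne (by omega : b ≠ i)]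
          exact K1 i c hcc hcl hib hcb
    · -- K3'
      intro c hcc hcl hcp0
      rw [hlen] at hcl
      have hpar : (cp - 1) / 2 = b := by omega
      have hccp : cp < c := by unfold pvChildOf at hcc; omega
      rw [hpar, pvGetD_set_self hp, pvGetD_set_ne (by omega : b ≠ c)]
      exact K1 cp c hcc hcl (by omega) (by omega)
  | case2 a b hc =>
    apply pvSiftdownLoop_heap (a.set b newitem) b newitem (by simpa using hp)
    · intro i c hcc hcl hib hcb
      rw [List.length_set] at hcl
      rw [pvGetD_set_ne (by omega : b ≠ c), pvGetD_set_ne (by omega : b ≠ i)]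
      exact K1 i c hcc hcl hib hcb
    · intro c hcc hcl
      rw [List.length_set] at hcl
      exfalso; unfold pvChildOf at hcc; omega
    · intro c hcc hcl
      rw [List.length_set] at hcl
      exfalso; unfold pvChildOf at hcc; omega

theorem pvGetD_append_left {α : Type} {h : List α} {x d : α} {j : Nat} (hj : j < h.length) :
    (h ++ [x]).getD j d = h.getD j d := by
  simp [List.getD_eq_getElem?_getD, List.getElem?_append_left hj]

theorem pvHeappush_spec (h : List (Int × Int)) (x : Int × Int) (hh : pvIsHeap h) :
    pvIsHeap (pvHeappush h x) ∧ (pvHeappush h x).Perm (h ++ [x]) := by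
  have hlen : (h ++ [x]).length = h.length + 1 := by simp
  have hpos : (h ++ [x]).length - 1 = h.length := by omega
  have hget_last : (h ++ [x]).getD h.length (0, 0) = x := by
    simp [List.getD_eq_getElem?_getD]
  have hp : h.length < (h ++ [x]).length := by omega
  constructor
  · unfold pvHeappush pvSiftdown
    rw [hpos, hget_last]
    apply pvSiftdownLoop_heap _ _ _ hp
    · intro i c hcc hcl hib hcb
      rw [hlen] at hcl
      have hic : i < c := by unfold pvChildOf at hcc; omega
      have hch : c < h.length := by omega
      rw [pvGetD_append_left hch, pvGetD_append_left (by omega)]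
      exact hh i c hcc hch
    · intro c hcc hcl
      rw [hlen] at hcl
      exfalso; unfold pvChildOf at hcc; omega
    · intro c hcc hcl
      rw [hlen] at hcl
      exfalso; unfold pvChildOf at hcc; omega
  · unfold pvHeappush pvSiftdown
    rw [hpos, hget_last]
    have h1 := pvSiftdownLoop_perm (h ++ [x]) h.length x hp
    have h2 : (h ++ [x]).set h.length x = h ++ [x] := by
      simp
    rwa [h2] at h1

theorem pvHeappop_spec (h : List (Int × Int)) (hh : pvIsHeap h) (hne : h ≠ []) :
    (pvHeappop h).1 = h.getD 0 (0, 0) ∧ pvIsHeap (pvHeappop h).2 ∧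
    (h.getD 0 (0, 0) :: (pvHeappop h).2).Perm h := by
  have hlpos : 0 < h.length := List.length_pos_iff.mpr hne
  by_cases hd : h.dropLast.isEmpty
  · -- h has exactly one element
    have hl1 : h.length = 1 := by
      simp only [List.isEmpty_iff] at hd
      have := congrArg List.length hd
      simp [List.length_dropLast] at this
      omega
    rcases h with _ | ⟨a, t⟩
    · simp at hlpos
    · have ht : t = [] := by simpa using hl1
      subst ht
      refine ⟨rfl, ?_, ?_⟩
      · simp [pvHeappop]
        intro i c hcc hcl
        simp at hcl
      · simp [pvHeappop]
  · -- at least two elements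
    have hrest_ne : h.dropLast ≠ [] := by simpa [List.isEmpty_iff] using hd
    have hrl : h.dropLast.length = h.length - 1 := List.length_dropLast
    have hl2 : 2 ≤ h.length := by
      have := List.length_pos_iff.mpr hrest_ne
      omega
    have hr0 : 0 < h.dropLast.length := by omega
    set lastelt := h.getLastD (0, 0) with hlast
    set r := h.dropLast.set 0 lastelt with hr
    have hrlen : r.length = h.length - 1 := by simp [hr, hrl]
    have heq : pvHeappop h = (h.dropLast.getD 0 (0, 0), pvSiftup r 0) := by
      simp [pvHeappop, hd, hr, hlast, List.getLastD_eq_getLast?]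
    have hget0 : h.dropLast.getD 0 (0, 0) = h.getD 0 (0, 0) := by
      rw [List.getD_eq_getElem _ _ hr0, List.getD_eq_getElem _ _ hlpos,
        List.getElem_dropLast]
    have hK1 : ∀ i c, pvChildOf c i → c < r.length → i ≠ 0 → c ≠ 0 →
        pvLt (r.getD c (0, 0)) (r.getD i (0, 0)) = false := by
      intro i c hcc hcl hi0 hc0
      have hic : i < c := by unfold pvChildOf at hcc; omega
      rw [hrlen] at hcl
      rw [hr, pvGetD_set_ne (by omega : 0 ≠ c), pvGetD_set_ne (by omega : 0 ≠ i)]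
      have hcd : c < h.dropLast.length := by omega
      have hgc : h.dropLast.getD c (0, 0) = h.getD c (0, 0) := by
        rw [List.getD_eq_getElem _ _ hcd, List.getD_eq_getElem _ _ (by omega),
          List.getElem_dropLast]
      have hgi : h.dropLast.getD i (0, 0) = h.getD i (0, 0) := by
        rw [List.getD_eq_getElem _ _ (by omega), List.getD_eq_getElem _ _ (by omega),
          List.getElem_dropLast]
      rw [hgc, hgi]
      exact hh i c hcc (by omega)
    have hsift := pvSiftupLoop_heap r 0 (r.getD 0 (0, 0)) (by omega) hK1
      (by intro c hcc hcl hcp0; omega)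
    have hperm := pvSiftupLoop_perm r 0 (r.getD 0 (0, 0)) (by omega)
    rw [heq]
    refine ⟨hget0, ?_, ?_⟩
    · simpa [pvSiftup] using hsift
    · have hr_set : r.set 0 (r.getD 0 (0, 0)) = r := by
        rw [List.getD_eq_getElem _ _ (by omega), List.set_getElem_self]
      rw [hr_set] at hperm
      have hperm2 : (pvSiftup r 0).Perm r := by simpa [pvSiftup] using hperm
      refine ((hperm2.cons _).trans ?_)
      have h1 : r.Perm (lastelt :: h.dropLast.eraseIdx 0) :=
        pvSet_perm_cons_eraseIdx lastelt hr0
      refine ((h1.cons _).trans ?_)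
      have hh_decomp : h = h.dropLast ++ [lastelt] := by
        rw [hlast, List.getLastD_eq_getLast?, List.getLast?_eq_some_getLast hne]
        simp [List.dropLast_append_getLast]
      rcases hdl : h.dropLast with _ | ⟨a, t⟩
      · exact absurd hdl hrest_ne
      · have ha : a = h.getD 0 (0, 0) := by
          have h3 := hget0
          rw [hdl] at h3
          simpa using h3
        simp only [List.eraseIdx_cons_zero]
        rw [hdl] at hh_decomp
        rw [← ha]
        have hperm3 : (a :: lastelt :: t).Perm ((a :: t) ++ [lastelt]) :=
          (List.perm_append_singleton lastelt t).symm.cons a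
        exact hperm3.trans (List.Perm.of_eq hh_decomp.symm)

theorem pvFoldl_heappush (ms : List (Int × Int)) :
    ∀ acc, pvIsHeap acc →
    pvIsHeap (ms.foldl pvHeappush acc) ∧ (ms.foldl pvHeappush acc).Perm (acc ++ ms) := by
  induction ms with
  | nil => intro acc hacc; exact ⟨hacc, by simp⟩
  | cons x t ih =>
    intro acc hacc
    obtain ⟨hph, hpp⟩ := pvHeappush_spec acc x hacc
    obtain ⟨h1, h2⟩ := ih (pvHeappush acc x) hph
    refine ⟨by simpa using h1, ?_⟩
    have h3 : ((pvHeappush acc x) ++ t).Perm ((acc ++ [x]) ++ t) := hpp.append_right t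
    have h4 : (acc ++ [x]) ++ t = acc ++ x :: t := by simp
    simp only [List.foldl_cons]
    exact h2.trans (h3.trans (List.Perm.of_eq h4))

theorem pvLt_fst_le {a b : Int × Int} (h : pvLt a b = true) : a.1 ≤ b.1 := by
  rcases a with ⟨a1, a2⟩; rcases b with ⟨b1, b2⟩
  simp [pvLt] at h; omega

theorem pvLt_of_fst_lt {a b : Int × Int} (h : a.1 < b.1) : pvLt a b = true := by
  rcases a with ⟨a1, a2⟩; rcases b with ⟨b1, b2⟩
  simp [pvLt] at h ⊢; omega

theorem pvLt_of_le_of_snd {a b : Int × Int} (h1 : a.1 ≤ b.1) (h2 : a.2 < b.2) :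
    pvLt a b = true := by
  rcases a with ⟨a1, a2⟩; rcases b with ⟨b1, b2⟩
  simp [pvLt] at h1 h2 ⊢; omega

theorem pvInsertBy_lex (x : Int × Int) :
    ∀ ys : List (Int × Int), ys.Pairwise (fun a b => pvLt a b = true) →
    (∀ y ∈ ys, y.2 < x.2) →
    (PySem.List.insertBy (fun a b => decide (a.1 < b.1)) x ys).Pairwise
      (fun a b => pvLt a b = true) := by
  intro ys
  induction ys with
  | nil => intro _ _; simp [PySem.List.insertBy]
  | cons y t ih =>
    intro hpw hlt
    rw [List.pairwise_cons] at hpw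
    obtain ⟨hhead, htail⟩ := hpw
    simp only [PySem.List.insertBy]
    by_cases hb : (x.1 < y.1)
    · rw [if_pos (by simpa using hb)]
      refine List.pairwise_cons.mpr ⟨?_, List.pairwise_cons.mpr ⟨hhead, htail⟩⟩
      intro z hz
      rcases List.mem_cons.mp hz with hz | hz
      · subst hz; exact pvLt_of_fst_lt hb
      · exact pvLt_of_fst_lt (lt_of_lt_of_le hb (pvLt_fst_le (hhead z hz)))
    · rw [if_neg (by simpa using hb)]
      refine List.pairwise_cons.mpr ⟨?_, ih htail (fun z hz => hlt z (by simp [hz]))⟩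
      intro z hz
      rcases (PySem.List.mem_insertBy _ _ _ _).mp hz with hz | hz
      · rw [hz]
        exact pvLt_of_le_of_snd (by omega) (hlt y (by simp))
      · exact hhead z hz

theorem pvFoldl_insertBy_lex :
    ∀ (xs acc : List (Int × Int)),
    acc.Pairwise (fun a b => pvLt a b = true) →
    (∀ a ∈ acc, ∀ x ∈ xs, a.2 < x.2) →
    xs.Pairwise (fun a b => a.2 < b.2) →
    (xs.foldl (fun acc x => PySem.List.insertBy (fun a b => decide (a.1 < b.1)) x acc)
      acc).Pairwise (fun a b => pvLt a b = true) := by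
  intro xs
  induction xs with
  | nil => intro acc hacc _ _; simpa using hacc
  | cons x t ih =>
    intro acc hacc hcross hxs
    rw [List.pairwise_cons] at hxs
    obtain ⟨hxhead, hxtail⟩ := hxs
    simp only [List.foldl_cons]
    apply ih
    · exact pvInsertBy_lex x acc hacc (fun a ha => hcross a ha x (by simp))
    · intro a ha z hz
      rcases (PySem.List.mem_insertBy _ _ _ _).mp ha with ha | ha
      · rw [ha]; exact hxhead z hz
      · exact hcross a ha z (by simp [hz])
    · exact hxtail

theorem pvSorted_fst_lex (xs : List (Int × Int)) (hx : xs.Pairwise (fun a b => a.2 < b.2)) :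
    (PySem.List.sorted xs (fun p => p.1)).Pairwise (fun a b => pvLt a b = true) := by
  rw [PySem.List.sorted_eq_foldl_insertBy]
  exact pvFoldl_insertBy_lex xs [] (by simp) (by simp) hx

-- B's break point and leftover, characterised through the sequential reference loop below
def pvLoopB (l : List (Int × Int)) (prev cnt k e0 : Int) : Int × Int :=
  match l with
  | [] => (e0, k)
  | (t, _) :: rest =>
    let bulk := (t - prev) * cnt
    if bulk > k then (e0, k)
    else pvLoopB rest t (cnt - 1) (k - bulk) (e0 + 1)

theorem pvLoop_agree :
    ∀ (l : List (Int × Int)) (fuel : Nat) (q : List (Int × Int)) (prev cnt k e0 : Int),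
    l.length ≤ fuel → pvIsHeap q → q.Perm l →
    l.Pairwise (fun a b => pvLt a b = true) →
    (pvLoopA fuel q prev cnt k).2 = (pvLoopB l prev cnt k e0).2 ∧
    ∃ e : Nat, (pvLoopB l prev cnt k e0).1 = e0 + (e : Int) ∧
      (pvLoopA fuel q prev cnt k).1.Perm (l.drop e) := by
  intro l
  induction l with
  | nil =>
    intro fuel q prev cnt k e0 hfuel hq hperm hlex
    have hq0 : q = [] := List.Perm.eq_nil hperm
    subst hq0
    rcases fuel with _ | fuel <;> simp [pvLoopA, pvLoopB]
  | cons p rest ih =>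
    intro fuel q prev cnt k e0 hfuel hq hperm hlex
    obtain ⟨t, o⟩ := p
    have hqne : q ≠ [] := by
      intro h0
      have := hperm.length_eq
      rw [h0] at this
      simp at this
    have hqpos : 0 < q.length := List.length_pos_iff.mpr hqne
    have hq0 : q.getD 0 (0, 0) = (t, o) := by
      have hmem : q.getD 0 (0, 0) ∈ q := by
        rw [List.getD_eq_getElem _ _ hqpos]
        exact List.getElem_mem hqpos
      have h1 : q.getD 0 (0, 0) ∈ (t, o) :: rest := hperm.mem_iff.mp hmem
      rcases List.mem_cons.mp h1 with h1 | h1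
      · simpa using h1
      · exfalso
        rw [List.pairwise_cons] at hlex
        have h2 : pvLt (t, o) (q.getD 0 (0, 0)) = true := hlex.1 _ h1
        have h3 : (t, o) ∈ q := hperm.mem_iff.mpr (by simp)
        obtain ⟨i, hi, hqi⟩ := List.getElem_of_mem h3
        have h4 := pvHeap_root q hq i hi
        rw [List.getD_eq_getElem _ _ hi, hqi] at h4
        rw [h4] at h2
        exact Bool.false_ne_true h2
    rcases fuel with _ | fuel
    · simp at hfuel
    rw [pvLoopA]
    rw [if_neg hqne]
    simp only [pvLoopB, hq0]
    by_cases hbulk : (t - prev) * cnt > k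
    · rw [if_pos hbulk, if_pos hbulk]
      exact ⟨rfl, 0, by simp, by simpa using hperm⟩
    · rw [if_neg hbulk, if_neg hbulk]
      obtain ⟨hpop1, hpop2, hpop3⟩ := pvHeappop_spec q hq hqne
      rw [hq0] at hpop3
      have hq2 : (pvHeappop q).2.Perm rest := by
        have := hpop3.trans hperm
        exact this.cons_inv
      have hfuel2 : rest.length ≤ fuel := by simp at hfuel; omega
      obtain ⟨hk, e, he1, he2⟩ :=
        ih fuel (pvHeappop q).2 t (cnt - 1) (k - (t - prev) * cnt) (e0 + 1)
          hfuel2 hpop2 hq2 (List.Pairwise.of_cons hlex)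
      refine ⟨hk, e + 1, ?_, ?_⟩
      · rw [he1]; push_cast; ring
      · simpa [List.drop_succ_cons] using he2

-- cumulative cost of fully eating the first m foods of the sorted order (reference form)
def pvCrec : List (Int × Int) → Int → Int → Nat → Int
  | _, _, _, 0 => 0
  | [], _, _, _ + 1 => 0
  | (t, _) :: rest, prev, cnt, m + 1 => (t - prev) * cnt + pvCrec rest t (cnt - 1) m

theorem pvLoopB_char :
    ∀ (l : List (Int × Int)) (prev cnt k e0 : Int),
    ∃ e : Nat, e ≤ l.length ∧ (pvLoopB l prev cnt k e0).1 = e0 + (e : Int) ∧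
      (pvLoopB l prev cnt k e0).2 = k - pvCrec l prev cnt e ∧
      (∀ m : Nat, m < e → pvCrec l prev cnt (m + 1) ≤ k) ∧
      (e < l.length → pvCrec l prev cnt (e + 1) > k) := by
  intro l
  induction l with
  | nil =>
    intro prev cnt k e0
    exact ⟨0, by simp [pvLoopB, pvCrec]⟩
  | cons p rest ih =>
    intro prev cnt k e0
    obtain ⟨t, o⟩ := p
    simp only [pvLoopB]
    by_cases hbulk : (t - prev) * cnt > k
    · rw [if_pos hbulk]
      refine ⟨0, by simp, by simp, by simp [pvCrec], by omega, ?_⟩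
      intro _
      simpa [pvCrec] using hbulk
    · rw [if_neg hbulk]
      obtain ⟨e, he_le, he1, he2, he3, he4⟩ := ih t (cnt - 1) (k - (t - prev) * cnt) (e0 + 1)
      refine ⟨e + 1, by simp; omega, by rw [he1]; push_cast; ring, ?_, ?_, ?_⟩
      · rw [he2]; simp [pvCrec]; ring
      · intro m hm
        cases m with
        | zero => simpa [pvCrec] using hbulk
        | succ m' =>
          have := he3 m' (by omega)
          simp only [pvCrec]
          omega
      · intro hlt
        have := he4 (by simpa using hlt)
        simp only [pvCrec]
        omega

-- one monotone step of the cost, valid when prev is below every listed time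
theorem pvCrec_step_le :
    ∀ (l : List (Int × Int)) (prev cnt : Int) (m : Nat),
    l.Pairwise (fun a b => a.1 ≤ b.1) → (∀ x ∈ l, prev ≤ x.1) → (l.length : Int) ≤ cnt →
    m < l.length → pvCrec l prev cnt m ≤ pvCrec l prev cnt (m + 1) := by
  intro l
  induction l with
  | nil => intro prev cnt m _ _ _ hm; simp at hm
  | cons p rest ih =>
    intro prev cnt m hpw hlb hcnt hm
    obtain ⟨t, o⟩ := p
    rw [List.pairwise_cons] at hpw
    cases m with
    | zero =>
      simp only [pvCrec]
      have h1 : prev ≤ t := hlb (t, o) (by simp)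
      have h2 : (0 : Int) ≤ cnt := by simp at hcnt; omega
      have := mul_nonneg (by omega : (0:Int) ≤ t - prev) h2
      omega
    | succ m' =>
      simp only [pvCrec]
      have := ih t (cnt - 1) m' hpw.2 (fun x hx => hpw.1 x hx) (by simp at hcnt ⊢; omega)
        (by simpa using hm)
      omega

theorem pvCrec_chain (l : List (Int × Int)) (prev cnt : Int)
    (hpw : l.Pairwise (fun a b => a.1 ≤ b.1)) (hlb : ∀ x ∈ l, prev ≤ x.1)
    (hcnt : (l.length : Int) ≤ cnt) :
    ∀ a b : Nat, a ≤ b → b ≤ l.length → pvCrec l prev cnt a ≤ pvCrec l prev cnt b := by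
  intro a b
  induction b with
  | zero => intro h1 _; have : a = 0 := by omega
            simp [this]
  | succ b ihb =>
    intro hab hble
    rcases Nat.eq_or_lt_of_le hab with rfl | h
    · exact le_refl _
    · exact le_trans (ihb (by omega) (by omega))
        (pvCrec_step_le l prev cnt b hpw hlb hcnt (by omega))

-- monotonicity from m ≥ 1 on, with arbitrary prev (the first bulk may be negative)
theorem pvCrec_mono_top (l : List (Int × Int)) (prev cnt : Int) (a b : Nat)
    (hpw : l.Pairwise (fun a b => a.1 ≤ b.1)) (hcnt : (l.length : Int) ≤ cnt)
    (ha : 1 ≤ a) (hab : a ≤ b) (hb : b ≤ l.length) :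
    pvCrec l prev cnt a ≤ pvCrec l prev cnt b := by
  rcases l with _ | ⟨⟨t, o⟩, rest⟩
  · simp at hb; omega
  · obtain ⟨a', rfl⟩ : ∃ a', a = a' + 1 := ⟨a - 1, by omega⟩
    obtain ⟨b', rfl⟩ : ∃ b', b = b' + 1 := ⟨b - 1, by omega⟩
    rw [List.pairwise_cons] at hpw
    simp only [pvCrec]
    have := pvCrec_chain rest t (cnt - 1) hpw.2 (fun x hx => hpw.1 x hx)
      (by simp at hcnt ⊢; omega) a' b' (by omega) (by simpa using hb)
    omega

-- the prefix-sum list Source B builds, in structural form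
def pvPreTail : List (Int × Int) → Int → List Int
  | [], _ => []
  | (t, _) :: rest, s => (s + t) :: pvPreTail rest (s + t)

theorem pvPre_fold :
    ∀ (l : List (Int × Int)) (s : Int) (acc : List Int),
    (l.foldl (fun sp p => (sp.1 + p.1, sp.2 ++ [sp.1 + p.1])) (s, acc)).2 =
      acc ++ pvPreTail l s := by
  intro l
  induction l with
  | nil => intro s acc; simp [pvPreTail]
  | cons p rest ih =>
    intro s acc
    simp only [List.foldl_cons, pvPreTail]
    rw [ih]
    rcases p with ⟨t, o⟩
    simp

theorem pvPreTail_getD :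
    ∀ (l : List (Int × Int)) (s : Int) (i : Nat), i < l.length →
    (pvPreTail l s).getD i 0 = s + ((l.take (i + 1)).map Prod.fst).sum := by
  intro l
  induction l with
  | nil => intro s i hi; simp at hi
  | cons p rest ih =>
    intro s i hi
    obtain ⟨t, o⟩ := p
    cases i with
    | zero => simp [pvPreTail]
    | succ i' =>
      simp only [pvPreTail, List.getD_cons_succ, List.take_succ_cons, List.map_cons,
        List.sum_cons]
      rw [ih (s + t) i' (by simpa using hi)]
      ring

theorem pvPre_getD (l : List (Int × Int)) (m : Nat) (hm : m ≤ l.length) :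
    ((0 : Int) :: pvPreTail l 0).getD m 0 = ((l.take m).map Prod.fst).sum := by
  cases m with
  | zero => simp
  | succ m' =>
    rw [List.getD_cons_succ, pvPreTail_getD l 0 m' (by omega)]
    ring

-- closed form of pvCrec (telescoped), for cnt-based weights
theorem pvCrec_closed :
    ∀ (l : List (Int × Int)) (prev cnt : Int) (m : Nat), m + 1 ≤ l.length →
    pvCrec l prev cnt (m + 1) =
      ((l.take m).map Prod.fst).sum + (l.getD m (0, 0)).1 * (cnt - m) - prev * cnt := by
  intro l
  induction l with
  | nil => intro prev cnt m hm; simp at hm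
  | cons p rest ih =>
    intro prev cnt m hm
    obtain ⟨t, o⟩ := p
    cases m with
    | zero => simp [pvCrec]; ring
    | succ m' =>
      simp only [pvCrec, List.take_succ_cons, List.map_cons, List.sum_cons,
        List.getD_cons_succ]
      rw [ih t (cnt - 1) m' (by simpa using hm)]
      push_cast
      ring

-- Source B's cost(m) equals the loop's cumulative cost
theorem pvCostB_eq_crec (l : List (Int × Int)) (m : Nat) (hm : m + 1 ≤ l.length) :
    pvCostB ((0 : Int) :: pvPreTail l 0) l (l.length : Int) ((m : Int) + 1) =
      pvCrec l 0 (l.length : Int) (m + 1) := by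
  unfold pvCostB
  rw [if_neg (by omega)]
  have hsimp : ((m : Int) + 1 - 1) = ((m : Nat) : Int) := by ring
  rw [hsimp, PySem.List.pyGetD_natCast, PySem.List.pyGetD_natCast]
  rw [pvPre_getD l m (by omega)]
  rw [pvCrec_closed l 0 (l.length : Int) m hm]
  ring

theorem pvBsearch_eq (cost : Int → Int) (k : Int) :
    ∀ (n : Nat) (lo hi e : Int), (hi - lo).toNat ≤ n →
    lo ≤ e → e ≤ hi →
    (∀ m : Int, lo ≤ m → m < e → ¬ cost (m + 1) > k) →
    (e < hi → cost (e + 1) > k) →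
    (∀ a b : Int, lo ≤ a → a ≤ b → b < hi → cost (a + 1) > k → cost (b + 1) > k) →
    pvBsearch cost k lo hi = e := by
  intro n
  induction n with
  | zero =>
    intro lo hi e hn hle hge _ _ _
    rw [pvBsearch, dif_neg (by omega)]
    omega
  | succ n ih =>
    intro lo hi e hn hle hge hlow hbreak hmono
    rw [pvBsearch]
    by_cases hlt : lo < hi
    · rw [dif_pos hlt]
      have hmb1 := (PySem.Int.le_floordiv_iff_mul_le (a := lo + hi) (q := lo)
        (by omega : (0:Int) < 2)).mpr (by omega)
      have hmb2 := (PySem.Int.floordiv_lt_iff_lt_mul (a := lo + hi) (q := hi)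
        (by omega : (0:Int) < 2)).mpr (by omega)
      set mid := PySem.Int.floordiv (lo + hi) 2 with hmid
      by_cases hq : cost (mid + 1) > k
      · rw [if_pos hq]
        have hemid : e ≤ mid := by
          by_contra hc
          exact (hlow mid hmb1 (by omega)) hq
        exact ih lo mid e (by omega) hle hemid hlow
          (fun hem => hbreak (by omega))
          (fun a b h1 h2 h3 => hmono a b h1 h2 (by omega))
      · rw [if_neg hq]
        have hemid : mid + 1 ≤ e := by
          by_contra hc
          exact hq (hmono e mid hle (by omega) hmb2 (hbreak (by omega)))
        exact ih (mid + 1) hi e (by omega) hemid hge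
          (fun m h1 h2 => hlow m (by omega) h2) hbreak
          (fun a b h1 h2 h3 => hmono a b (by omega) h2 h3)
    · rw [dif_neg hlt]
      omega

theorem pvMain (ft : List Int) (k : Int) (hsum : ¬ ft.sum ≤ k) :
    solution ft k = solution_alt ft k := by
  unfold solution solution_alt
  rw [if_neg hsum, if_neg hsum]
  simp only []
  -- A's pushed items, as a mapped list
  have hfold :
      (PySem.List.pyRange 0 (ft.length : Int)).foldl
        (fun q idx => pvHeappush q (PySem.List.pyGetD ft idx 0, idx + 1)) [] =
      ((PySem.List.pyRange 0 (ft.length : Int)).map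
        (fun idx => (PySem.List.pyGetD ft idx 0, idx + 1))).foldl pvHeappush [] :=
    (List.foldl_map).symm
  have hms : ((PySem.List.pyRange 0 (ft.length : Int)).map
      (fun idx => (PySem.List.pyGetD ft idx 0, idx + 1))) =
      ((PySem.List.enumerate ft 1).map (fun p => (p.2, p.1))) := by
    apply List.ext_getElem
    · simp [PySem.List.length_pyRange_one, PySem.List.length_enumerate]
    · intro i h1 h2
      have hilen : i < ft.length := by
        simpa [PySem.List.length_pyRange_one] using h1
      simp only [List.getElem_map]
      rw [PySem.List.getElem_pyRange_one 0 (ft.length : Int) i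
        (by simpa [PySem.List.length_pyRange_one] using h1)]
      rw [PySem.List.getElem_enumerate ft 1 i
        (by simpa [PySem.List.length_enumerate] using hilen)]
      have hget : PySem.List.pyGetD ft ((0 : Int) + (i : Int)) 0 = ft[i] := by
        rw [show ((0 : Int) + (i : Int)) = (i : Int) by ring]
        rw [PySem.List.pyGetD_eq_getElem ft 0 (by positivity) (by exact_mod_cast hilen)]
        simp
      rw [hget]
      refine Prod.ext ?_ ?_
      · simp
      · simp; ring
  set xs := (PySem.List.enumerate ft 1).map (fun p => (p.2, p.1)) with hxs
  have hx2 : xs.Pairwise (fun a b => a.2 < b.2) := by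
    rw [hxs, List.pairwise_map]
    simpa using PySem.List.pairwise_lt_enumerate ft 1
  set l := PySem.List.sorted xs (fun x => x.1) with hl
  have hlex : l.Pairwise (fun a b => pvLt a b = true) := pvSorted_fst_lex xs hx2
  have hlperm : l.Perm xs := PySem.List.sorted_perm xs (fun x => x.1) false
  have hllen : l.length = ft.length := by
    rw [hlperm.length_eq, hxs]
    simp [PySem.List.length_enumerate]
  obtain ⟨hq_heap, hq_perm⟩ := pvFoldl_heappush xs []
    (by intro i c hcc hcl; simp at hcl)
  rw [hfold, hms]
  have hqperm : (xs.foldl pvHeappush []).Perm l := by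
    refine hq_perm.trans ?_
    simpa using hlperm.symm
  obtain ⟨hk_eq, eA, heA1, heA2⟩ :=
    pvLoop_agree l (xs.foldl pvHeappush []).length (xs.foldl pvHeappush []) 0
      (ft.length : Int) k 0
      (by rw [hqperm.length_eq]) hq_heap hqperm hlex
  obtain ⟨e, he_le, he1, he2, he3, he4⟩ := pvLoopB_char l 0 (ft.length : Int) k 0
  have heAe : eA = e := by
    rw [he1] at heA1
    omega
  rw [heAe] at heA2
  set rA := pvLoopA (xs.foldl pvHeappush []).length (xs.foldl pvHeappush []) 0
    (ft.length : Int) k with hrA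
  -- B's prefix list
  have hpre : (l.foldl (fun sp p => (sp.1 + p.1, sp.2 ++ [sp.1 + p.1]))
      ((0 : Int), ([0] : List Int))).2 = (0 : Int) :: pvPreTail l 0 := by
    rw [pvPre_fold]
    rfl
  rw [hpre]
  set pre := (0 : Int) :: pvPreTail l 0 with hpredef
  -- cost through pvCrec, for arguments 1 ≤ m ≤ l.length
  have hpw_le : l.Pairwise (fun a b => a.1 ≤ b.1) := hlex.imp (fun h => pvLt_fst_le h)
  have hcost : ∀ m : Nat, m + 1 ≤ l.length →
      pvCostB pre l (ft.length : Int) ((m : Int) + 1) = pvCrec l 0 (ft.length : Int) (m + 1) := by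
    intro m hm
    have := pvCostB_eq_crec l m hm
    rwa [hllen] at this
  -- binary search returns e
  have hbs : pvBsearch (pvCostB pre l (ft.length : Int)) k 0 (ft.length : Int) = (e : Int) := by
    apply pvBsearch_eq (pvCostB pre l (ft.length : Int)) k ft.length
    · omega
    · exact Int.natCast_nonneg e
    · exact_mod_cast hllen ▸ he_le
    · intro m hm0 hme
      have hmN : m = ((m.toNat : Nat) : Int) := by omega
      rw [hmN]
      have hlt : m.toNat < e := by omega
      rw [hcost m.toNat (by omega)]
      have := he3 m.toNat hlt
      omega
    · intro hlt
      have heln : e < l.length := by omega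
      have := he4 heln
      have hc := hcost e (by omega)
      push_cast at hc ⊢
      omega
    · intro a b ha hab hb hqa
      have haN : a = ((a.toNat : Nat) : Int) := by omega
      have hbN : b = ((b.toNat : Nat) : Int) := by omega
      rw [hbN, hcost b.toNat (by omega)]
      rw [haN, hcost a.toNat (by omega)] at hqa
      have hmono := pvCrec_mono_top l 0 (ft.length : Int) (a.toNat + 1) (b.toNat + 1)
        hpw_le (by omega) (by omega) (by omega) (by omega)
      omega
  rw [hbs]
  -- final value of cost at e
  have hcost_e : pvCostB pre l (ft.length : Int) (e : Int) = pvCrec l 0 (ft.length : Int) e := by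
    cases e with
    | zero => simp [pvCostB, pvCrec]
    | succ e' =>
      have := hcost e' (by omega)
      push_cast at this ⊢
      exact this
  -- e ≤ l.length (Nat) for slice
  have hslice : PySem.List.slice l (some (e : Int)) none = l.drop e :=
    PySem.List.slice_from_natCast l e
  rw [hslice, hcost_e, ← he2, ← hk_eq]
  set ys := PySem.List.sorted (l.drop e) (fun p => p.2) with hys
  have hnd_ys : (ys.map (fun p : Int × Int => p.2)).Nodup := by
    have hxs_map : (xs.map (fun p : Int × Int => p.2)).Pairwise (· < ·) :=
      List.pairwise_map.mpr hx2
    have hxs_nd : (xs.map (fun p : Int × Int => p.2)).Nodup :=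
      hxs_map.imp (fun h => ne_of_lt h)
    have hl_nd : (l.map (fun p : Int × Int => p.2)).Nodup :=
      ((hlperm.map _).nodup_iff).mpr hxs_nd
    have hdrop_nd : ((l.drop e).map (fun p : Int × Int => p.2)).Nodup := by
      rw [List.map_drop]
      exact (List.drop_sublist e _).nodup hl_nd
    have hys_perm : ys.Perm (l.drop e) := PySem.List.sorted_perm _ _ false
    exact ((hys_perm.map _).nodup_iff).mpr hdrop_nd
  have hys_lt : ys.Pairwise (fun a b : Int × Int => a.2 < b.2) := by
    have h_le : ys.Pairwise (fun a b : Int × Int => a.2 ≤ b.2) :=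
      PySem.List.sorted_pairwise (l.drop e) (fun p => p.2)
    have h_ne : ys.Pairwise (fun a b : Int × Int => a.2 ≠ b.2) :=
      List.pairwise_map.mp hnd_ys
    exact (h_le.and h_ne).imp (fun h => lt_of_le_of_ne h.1 h.2)
  have hys_perm : ys.Perm (l.drop e) := PySem.List.sorted_perm _ _ false
  -- A's final sort equals ys
  have hA_s : PySem.List.sorted rA.1 (fun x => x.2) = ys :=
    PySem.List.sorted_eq_of_perm_of_pairwise_lt rA.1 ys (fun x => x.2)
      (hys_perm.trans heA2.symm) hys_lt
  -- B's sorted leftover indices are ys's indices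
  have hB_rem : PySem.List.sorted ((l.drop e).map (fun p => p.2)) (fun x => x) =
      ys.map (fun p : Int × Int => p.2) :=
    PySem.List.sorted_eq_of_perm_of_pairwise_lt _ _ _
      (hys_perm.map _) (List.pairwise_map.mpr hys_lt)
  rw [hA_s, hB_rem]
  rw [List.length_map]
  rcases List.eq_nil_or_concat ys with hys_nil | _
  · rw [hys_nil]
    simp [PySem.List.pyGetD, PySem.List.pyGet?, PySem.List.pyIdx?]
  · have hys_pos : 0 < ys.length := by
      rcases ys with _ | _
      · simp_all
      · simp
    have hlen_pos : (0 : Int) < (ys.length : Int) := by exact_mod_cast hys_pos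
    have hj0 : 0 ≤ PySem.Int.mod rA.2 (ys.length : Int) :=
      PySem.Int.mod_nonneg _ hlen_pos
    have hjlt : PySem.Int.mod rA.2 (ys.length : Int) < (ys.length : Int) :=
      PySem.Int.mod_lt _ hlen_pos
    rw [PySem.List.pyGetD_eq_getElem ys (0, 0) hj0 (by exact_mod_cast hjlt),
      PySem.List.pyGetD_eq_getElem (ys.map (fun p : Int × Int => p.2)) 0 hj0
        (by simpa using hjlt)]
    simp

-- ===== VERDICT (by name: the statement is the Claim_ definition above) =====
theorem solution_spec : Claim_equal_solution := by
  unfold Claim_equal_solution Spec_solution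
  intro ft k _hdom _hpre
  by_cases hsum : ft.sum ≤ k
  · unfold solution solution_alt
    rw [if_pos hsum, if_pos hsum]
  · exact pvMain ft k hsum
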